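-- pv_equiv track=rewrite | github.com/hukimato/asum | asum/template/Interpreter.py | find_end_of_for
-- ===== SOURCE A (Python) =====
-- def find_end_of_for(start_index, content):
--     endif_balance = 1
--     stop_index = start_index
--     while endif_balance != 0:
--         stop_index += 1
--         if 'for ' in content[stop_index]:
--             endif_balance += 1
--         elif 'endfor' in content[stop_index]:
--             endif_balance -= 1
--     return stop_index
-- ===== SOURCE B (Python) =====
-- def find_end_of_for(start_index, content):
--     index = start_index + 1
--     while True:
--         line = content[index]
--         if 'for ' in line:
--             index = find_end_of_for(index, content) + 1
--         elif 'endfor' in line: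
--             return index
--         else:
--             index += 1
-- ===== Notes on version B (the rewrite author's own statement) =====
-- stated objective: alternative
-- what changed: Replaces the single balance-counter loop with a recursive scan that mirrors the loop nesting: on an inner 'for ' line it recursively finds that inner loop's endfor and resumes just past it; no counter is kept.
import Mathlib
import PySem

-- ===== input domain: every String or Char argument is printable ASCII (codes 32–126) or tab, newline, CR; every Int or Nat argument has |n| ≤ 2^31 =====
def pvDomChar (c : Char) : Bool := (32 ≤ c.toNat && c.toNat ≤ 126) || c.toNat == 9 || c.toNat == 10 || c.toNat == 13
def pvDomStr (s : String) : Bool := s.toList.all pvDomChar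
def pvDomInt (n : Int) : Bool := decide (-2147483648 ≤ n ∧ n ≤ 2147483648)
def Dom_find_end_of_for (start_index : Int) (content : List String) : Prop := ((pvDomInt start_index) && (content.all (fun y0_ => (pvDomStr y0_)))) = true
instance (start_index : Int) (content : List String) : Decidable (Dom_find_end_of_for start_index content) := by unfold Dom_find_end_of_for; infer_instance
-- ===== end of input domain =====

-- B replaces A's balance counter with recursion mirroring the loop nesting (same cost, return value only;
-- neither mutates its arguments). Pre_ excludes exactly the inputs where A raises IndexError.

-- ===== PORT A =====
-- A's while-loop as fuel recursion: state (endif_balance, stop_index); each step probes content[stop_index+1].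
-- Fuel 2*len+2 bounds the probe count (indices move upward through [-len, len-1]); running out ≡ IndexError (none).
def goA (content : List String) : Nat → Int → Int → Option Int
  | 0, _, _ => none
  | f+1, bal, stop =>
    let stop' := stop + 1
    match PySem.List.pyGet? content stop' with
    | none => none
    | some line =>
      let bal' := if PySem.Str.isIn "for " line then bal + 1
                  else if PySem.Str.isIn "endfor" line then bal - 1
                  else bal
      if bal' = 0 then some stop' else goA content f bal' stop'

def find_end_of_for (start_index : Int) (content : List String) : Int :=
  (goA content (2 * content.length + 2) 1 start_index).getD 0

-- ===== PORT B =====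
-- B's recursion as fuel recursion; returns (result index, remaining fuel) so the caller can resume after
-- an inner loop ('min f f'' is a totality device only: remaining fuel is always below the fuel given).
def goB (content : List String) : Nat → Int → Option (Int × Nat)
  | 0, _ => none
  | f+1, i =>
    match PySem.List.pyGet? content i with
    | none => none
    | some line =>
      if PySem.Str.isIn "for " line then
        match goB content f (i+1) with
        | none => none
        | some (j, f') => goB content (min f f') (j+1)
      else if PySem.Str.isIn "endfor" line then some (i, f)
      else goB content f (i+1)
  termination_by f _ => f
  decreasing_by all_goals omega

def find_end_of_for_alt (start_index : Int) (content : List String) : Int :=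
  ((goB content (2 * content.length + 2) (start_index + 1)).map Prod.fst).getD 0

-- ===== PRECONDITION & SPEC =====
-- Pre_: exactly the inputs on which Python A returns (otherwise it raises IndexError): the scan stays in
-- index range and some probed line brings the for/endfor balance down to zero.
def lineDelta (line : String) : Int :=
  if PySem.Str.isIn "for " line then 1 else if PySem.Str.isIn "endfor" line then -1 else 0

def Pre_find_end_of_for (start_index : Int) (content : List String) : Prop :=
  -(content.length : Int) ≤ start_index + 1 ∧
  ∃ j ∈ PySem.List.pyRange (start_index + 1) content.length 1,
    1 + ((PySem.List.pyRange (start_index + 1) (j + 1) 1).map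
          (fun k => lineDelta ((PySem.List.pyGet? content k).getD ""))).sum = 0
instance (start_index : Int) (content : List String) : Decidable (Pre_find_end_of_for start_index content) := by
  unfold Pre_find_end_of_for; infer_instance

def pvWitness_find_end_of_for : Int × List String := (-1, ["endfor"])

def Spec_find_end_of_for (start_index : Int) (content : List String) (out : Int) : Prop := out = find_end_of_for_alt start_index content
instance (start_index : Int) (content : List String) (out : Int) : Decidable (Spec_find_end_of_for start_index content out) := by unfold Spec_find_end_of_for; infer_instance

-- ===== CLAIM (what is proved, stated in full; the proofs are below) =====
def Claim_equal_find_end_of_for : Prop := ∀ (start_index : Int) (content : List String), Dom_find_end_of_for start_index content → Pre_find_end_of_for start_index content → Spec_find_end_of_for start_index content (find_end_of_for start_index content)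

-- ===== LEMMAS AND PROOFS =====

-- goB returns strictly less fuel than it was given.
theorem goB_fuel_lt (content : List String) :
    ∀ f i j f', goB content f i = some (j, f') → f' < f := by
  intro f
  induction f using Nat.strong_induction_on with
  | _ f ih =>
    intro i j f' h
    match f with
    | 0 => simp [goB] at h
    | g+1 =>
      rw [goB] at h
      cases hg : PySem.List.pyGet? content i with
      | none => rw [hg] at h; simp at h
      | some line =>
        rw [hg] at h
        dsimp only at h
        by_cases h1 : PySem.Str.isIn "for " line
        · rw [if_pos h1] at h
          cases hin : goB content g (i+1) with
          | none => rw [hin] at h; simp at h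
          | some p =>
            rw [hin] at h
            dsimp only at h
            have := ih g (by omega) _ _ _ hin
            have h2 := ih (min g p.2) (by omega) _ _ _ h
            omega
        · rw [if_neg h1] at h
          by_cases h2 : PySem.Str.isIn "endfor" line
          · rw [if_pos h2] at h
            cases h; omega
          · rw [if_neg h2] at h
            have := ih g (by omega) _ _ _ h
            omega

-- Main simulation: A's loop with balance b >= 1 is B's one-level scan followed, if b > 1,
-- by A's loop with balance b-1 from the endfor found (with exactly the remaining fuel).
theorem goA_eq_goB (content : List String) :
    ∀ f (b i : Int), 1 ≤ b →
      goA content f b i =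
        (match goB content f (i + 1) with
         | none => none
         | some (j, f') => if b = 1 then some j else goA content f' (b - 1) j) := by
  intro f
  induction f using Nat.strong_induction_on with
  | _ f ih =>
    intro b i hb
    match f with
    | 0 => simp [goA, goB]
    | g+1 =>
      rw [goA, goB]
      cases hg : PySem.List.pyGet? content (i + 1) with
      | none => dsimp only
      | some line =>
        dsimp only
        by_cases h1 : PySem.Str.isIn "for " line
        · rw [if_pos h1, if_pos h1]
          have hne : ¬ (b + 1 = 0) := by omega
          rw [if_neg hne]
          rw [ih g (by omega) (b+1) (i+1) (by omega)]
          cases hin : goB content g (i + 1 + 1) with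
          | none => dsimp only
          | some p =>
            obtain ⟨j1, f1⟩ := p
            dsimp only
            have hf1 : f1 < g := goB_fuel_lt content g _ _ _ hin
            have hmin : min g f1 = f1 := by omega
            rw [hmin]
            have hb1 : ¬ (b + 1 = 1) := by omega
            rw [if_neg hb1]
            have hsub : b + 1 - 1 = b := by ring
            rw [hsub]
            rw [ih f1 (by omega) b j1 hb]
        · rw [if_neg h1, if_neg h1]
          by_cases h2 : PySem.Str.isIn "endfor" line
          · rw [if_pos h2, if_pos h2]
            by_cases hb1 : b = 1
            · subst hb1
              norm_num
            · have hz : ¬ (b - 1 = 0) := by omega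
              rw [if_neg hz]
              dsimp only
              rw [if_neg hb1]
          · rw [if_neg h2, if_neg h2]
            have hne : ¬ (b = 0) := by omega
            rw [if_neg hne]
            exact ih g (by omega) b (i+1) hb

-- With balance 1 the two scans coincide exactly (fuel for fuel), hence so do the ports.
theorem ports_eq (start_index : Int) (content : List String) :
    find_end_of_for start_index content = find_end_of_for_alt start_index content := by
  unfold find_end_of_for find_end_of_for_alt
  rw [goA_eq_goB content (2 * content.length + 2) 1 start_index (by omega)]
  cases h : goB content (2 * content.length + 2) (start_index + 1) with
  | none => simp
  | some p => simp

-- ===== VERDICT (by name: the statement is the Claim_ definition above) =====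
theorem find_end_of_for_spec : Claim_equal_find_end_of_for := by
  intro start_index content _ _
  unfold Spec_find_end_of_for
  exact ports_eq start_index content
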